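-- pv_equiv track=rewrite | github.com/joshuaquek/agent-zero-telegram-proxy | md_to_html.py | _combine_blockquotes
-- ===== SOURCE A (Python) =====
-- def _combine_blockquotes(text: str) -> str:
--     """Collapse consecutive markdown blockquote lines into Telegram <blockquote> HTML."""
--     lines = text.split("\n")
--     combined: list[str] = []
--     bq_lines: list[str] = []
--     in_bq = False
--     expandable = False
--
--     for line in lines:
--         if line.startswith("**>"):
--             in_bq = True
--             expandable = True
--             bq_lines.append(line[3:].strip())
--         elif line.startswith(">**") and (len(line) == 3 or line[3].isspace()):
--             in_bq = True
--             expandable = True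
--             bq_lines.append(line[3:].strip())
--         elif line.startswith(">"):
--             if not in_bq:
--                 in_bq = True
--                 expandable = False
--             bq_lines.append(line[1:].strip())
--         else:
--             if in_bq:
--                 tag = "blockquote expandable" if expandable else "blockquote"
--                 combined.append(f"<{tag}>" + "\n".join(bq_lines) + "</blockquote>")
--                 bq_lines = []
--                 in_bq = False
--                 expandable = False
--             combined.append(line)
--
--     if in_bq:
--         tag = "blockquote expandable" if expandable else "blockquote"
--         combined.append(f"<{tag}>" + "\n".join(bq_lines) + "</blockquote>")
--
--     return "\n".join(combined)
-- ===== SOURCE B (Python) =====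
-- def _is_bq(line: str) -> bool:
--     return line.startswith("**>") or line.startswith(">")
--
--
-- def _is_strong(line: str) -> bool:
--     return line.startswith("**>") or (
--         line.startswith(">**") and (len(line) == 3 or line[3].isspace())
--     )
--
--
-- def _content(line: str) -> str:
--     return (line[3:] if _is_strong(line) else line[1:]).strip()
--
--
-- def _combine_blockquotes(text: str) -> str:
--     """Collapse consecutive markdown blockquote lines into Telegram <blockquote> HTML."""
--     lines = text.split("\n")
--     out = []
--     i = 0
--     n = len(lines)
--     while i < n:
--         if _is_bq(lines[i]):
--             j = i + 1
--             while j < n and _is_bq(lines[j]):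
--                 j += 1
--             run = lines[i:j]
--             tag = "blockquote expandable" if any(_is_strong(l) for l in run) else "blockquote"
--             body = "\n".join(_content(l) for l in run)
--             out.append(f"<{tag}>{body}</blockquote>")
--             i = j
--         else:
--             out.append(lines[i])
--             i += 1
--     return "\n".join(out)
-- ===== Notes on version B (the rewrite author's own statement) =====
-- stated objective: alternative
-- what changed: Replaces A's stateful line-by-line flag machine (in_bq/expandable/bq_lines mutated across iterations) by a run-based scan: find each maximal run of blockquote lines, compute its tag with any() and its body with a single map/join, and emit it at once.
import Mathlib
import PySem

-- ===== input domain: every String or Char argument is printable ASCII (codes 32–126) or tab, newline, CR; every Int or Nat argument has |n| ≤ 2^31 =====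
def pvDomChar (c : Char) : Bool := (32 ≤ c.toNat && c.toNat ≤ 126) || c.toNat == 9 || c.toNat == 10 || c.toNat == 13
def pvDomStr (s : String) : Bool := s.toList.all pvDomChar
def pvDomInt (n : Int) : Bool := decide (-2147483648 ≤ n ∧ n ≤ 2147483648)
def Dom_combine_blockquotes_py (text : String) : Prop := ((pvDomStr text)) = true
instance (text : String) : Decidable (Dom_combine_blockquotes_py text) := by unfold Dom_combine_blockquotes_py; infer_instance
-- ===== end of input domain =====

-- B replaces A's stateful flag machine by a run-based scan over maximal blockquote runs (alternative decomposition, same cost).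

-- ===== PORT A =====
-- the for-loop over lines with state (bq_lines, in_bq, expandable); combined entries are emitted in order
def pvLoopA : List String → List String → Bool → Bool → List String
  | [], bq_lines, in_bq, expandable =>
      if in_bq then
        ["<" ++ (if expandable then "blockquote expandable" else "blockquote") ++ ">" ++
          PySem.Str.join "\n" bq_lines ++ "</blockquote>"]
      else []
  | line :: rest, bq_lines, in_bq, expandable =>
      if PySem.Str.startswith line "**>" then
        pvLoopA rest (bq_lines ++ [PySem.Str.strip (PySem.Str.slice line (some 3) none)]) true true
      else if PySem.Str.startswith line ">**" &&
          (PySem.Str.len line == 3 ||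
            (match PySem.Str.pyGet? line 3 with | some c => PySem.Chars.isspace c | none => false)) then
        pvLoopA rest (bq_lines ++ [PySem.Str.strip (PySem.Str.slice line (some 3) none)]) true true
      else if PySem.Str.startswith line ">" then
        let p := if !in_bq then (true, false) else (in_bq, expandable)
        pvLoopA rest (bq_lines ++ [PySem.Str.strip (PySem.Str.slice line (some 1) none)]) p.1 p.2
      else
        (if in_bq then
          ["<" ++ (if expandable then "blockquote expandable" else "blockquote") ++ ">" ++
            PySem.Str.join "\n" bq_lines ++ "</blockquote>"]
        else []) ++ line :: pvLoopA rest [] false false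

def combine_blockquotes_py (text : String) : String :=
  PySem.Str.join "\n" (pvLoopA ((PySem.Str.split? text "\n").getD []) [] false false)

-- ===== PORT B =====
def pvIsBq (line : String) : Bool :=
  PySem.Str.startswith line "**>" || PySem.Str.startswith line ">"

def pvIsStrong (line : String) : Bool :=
  PySem.Str.startswith line "**>" ||
    (PySem.Str.startswith line ">**" &&
      (PySem.Str.len line == 3 ||
        (match PySem.Str.pyGet? line 3 with | some c => PySem.Chars.isspace c | none => false)))

def pvContent (line : String) : String :=
  PySem.Str.strip
    (if pvIsStrong line then PySem.Str.slice line (some 3) none else PySem.Str.slice line (some 1) none)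

def pvEmit (run : List String) : String :=
  let tag := if run.any pvIsStrong then "blockquote expandable" else "blockquote"
  "<" ++ tag ++ ">" ++ PySem.Str.join "\n" (run.map pvContent) ++ "</blockquote>"

-- the outer while loop: take a maximal run of blockquote lines, emit it, continue after it
def pvLoopB : List String → List String
  | [] => []
  | l :: rest =>
      if pvIsBq l then
        pvEmit (l :: rest.takeWhile pvIsBq) :: pvLoopB (rest.dropWhile pvIsBq)
      else
        l :: pvLoopB rest
termination_by lines => lines.length
decreasing_by
  · have := List.length_dropWhile_le pvIsBq rest
    simp; omega
  · simp

def combine_blockquotes_py_alt (text : String) : String :=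
  PySem.Str.join "\n" (pvLoopB ((PySem.Str.split? text "\n").getD []))

-- ===== PRECONDITION & SPEC =====
def Spec_combine_blockquotes_py (text : String) (out : String) : Prop := out = combine_blockquotes_py_alt text
instance (text : String) (out : String) : Decidable (Spec_combine_blockquotes_py text out) := by unfold Spec_combine_blockquotes_py; infer_instance

-- ===== CLAIM (what is proved, stated in full; the proofs are below) =====
def Claim_equal_combine_blockquotes_py : Prop := ∀ (text : String), Dom_combine_blockquotes_py text → Spec_combine_blockquotes_py text (combine_blockquotes_py text)

-- ===== LEMMAS AND PROOFS =====

def pvMk (exp : Bool) (bq : List String) : String :=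
  "<" ++ (if exp then "blockquote expandable" else "blockquote") ++ ">" ++
    PySem.Str.join "\n" bq ++ "</blockquote>"

def pvTail : List String → List String
  | [] => []
  | l :: r => l :: pvLoopA r [] false false

theorem pv_sw_trans (l : String) (h : PySem.Str.startswith l ">**" = true) :
    PySem.Str.startswith l ">" = true := by
  simp [PySem.Str.startswith, PySem.Chars.startswith] at h ⊢
  obtain ⟨t, ht⟩ := h
  exact ⟨'*' :: '*' :: t, by simp [← ht]⟩

theorem pv_stepBq (l : String) (h : pvIsBq l = true) (rest : List String)
    (bq : List String) (exp : Bool) :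
    pvLoopA (l :: rest) bq true exp
      = pvLoopA rest (bq ++ [pvContent l]) true (exp || pvIsStrong l) := by
  simp only [pvLoopA]
  by_cases h1 : PySem.Str.startswith l "**>" = true
  · rw [if_pos h1]
    have hs : pvIsStrong l = true := by simp only [pvIsStrong, h1, Bool.true_or]
    simp [pvContent, hs]
  · have h1' : PySem.Str.startswith l "**>" = false := by
      rw [← Bool.not_eq_true]; exact h1
    rw [if_neg h1]
    by_cases h2 : (PySem.Str.startswith l ">**" &&
        (PySem.Str.len l == 3 ||
          (match PySem.Str.pyGet? l 3 with | some c => PySem.Chars.isspace c | none => false))) = true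
    · rw [if_pos h2]
      have hs : pvIsStrong l = true := by
        simp only [pvIsStrong, h1', Bool.false_or]; exact h2
      simp [pvContent, hs]
    · have h2' : (PySem.Str.startswith l ">**" &&
          (PySem.Str.len l == 3 ||
            (match PySem.Str.pyGet? l 3 with | some c => PySem.Chars.isspace c | none => false))) = false := by
        rw [← Bool.not_eq_true]; exact h2
      have h3 : PySem.Str.startswith l ">" = true := by
        simp only [pvIsBq, h1', Bool.false_or] at h; exact h
      rw [if_neg h2, if_pos h3]
      have hs : pvIsStrong l = false := by
        simp only [pvIsStrong, h1', Bool.false_or]; exact h2'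
      simp [pvContent, hs]

theorem pv_stepFresh (l : String) (h : pvIsBq l = true) (rest : List String) :
    pvLoopA (l :: rest) [] false false
      = pvLoopA rest [pvContent l] true (pvIsStrong l) := by
  simp only [pvLoopA]
  by_cases h1 : PySem.Str.startswith l "**>" = true
  · rw [if_pos h1]
    have hs : pvIsStrong l = true := by simp only [pvIsStrong, h1, Bool.true_or]
    simp [pvContent, hs]
  · have h1' : PySem.Str.startswith l "**>" = false := by
      rw [← Bool.not_eq_true]; exact h1
    rw [if_neg h1]
    by_cases h2 : (PySem.Str.startswith l ">**" &&
        (PySem.Str.len l == 3 ||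
          (match PySem.Str.pyGet? l 3 with | some c => PySem.Chars.isspace c | none => false))) = true
    · rw [if_pos h2]
      have hs : pvIsStrong l = true := by
        simp only [pvIsStrong, h1', Bool.false_or]; exact h2
      simp [pvContent, hs]
    · have h2' : (PySem.Str.startswith l ">**" &&
          (PySem.Str.len l == 3 ||
            (match PySem.Str.pyGet? l 3 with | some c => PySem.Chars.isspace c | none => false))) = false := by
        rw [← Bool.not_eq_true]; exact h2
      have h3 : PySem.Str.startswith l ">" = true := by
        simp only [pvIsBq, h1', Bool.false_or] at h; exact h
      rw [if_neg h2, if_pos h3]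
      have hs : pvIsStrong l = false := by
        simp only [pvIsStrong, h1', Bool.false_or]; exact h2'
      simp [pvContent, hs]

theorem pv_stepNon (l : String) (h : pvIsBq l = false) (rest bq : List String)
    (in_bq exp : Bool) :
    pvLoopA (l :: rest) bq in_bq exp
      = (if in_bq then [pvMk exp bq] else []) ++ l :: pvLoopA rest [] false false := by
  have h1 : PySem.Str.startswith l "**>" = false := by
    simp only [pvIsBq, Bool.or_eq_false_iff] at h; exact h.1
  have h3 : PySem.Str.startswith l ">" = false := by
    simp only [pvIsBq, Bool.or_eq_false_iff] at h; exact h.2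
  have h2 : (PySem.Str.startswith l ">**" &&
      (PySem.Str.len l == 3 ||
        (match PySem.Str.pyGet? l 3 with | some c => PySem.Chars.isspace c | none => false))) = false := by
    cases hsw : PySem.Str.startswith l ">**" with
    | false => simp
    | true => rw [pv_sw_trans l hsw] at h3; cases h3
  simp only [pvLoopA]
  rw [if_neg (by rw [Bool.not_eq_true]; exact h1), if_neg (by rw [Bool.not_eq_true]; exact h2),
    if_neg (by rw [Bool.not_eq_true]; exact h3)]
  cases in_bq <;> simp [pvMk]

theorem pv_run (lines : List String) : ∀ (bq : List String) (exp : Bool),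
    pvLoopA lines bq true exp
      = pvMk (exp || (lines.takeWhile pvIsBq).any pvIsStrong)
          (bq ++ (lines.takeWhile pvIsBq).map pvContent)
        :: pvTail (lines.dropWhile pvIsBq) := by
  induction lines with
  | nil => intro bq exp; simp [pvLoopA, pvMk, pvTail]
  | cons l rest ih =>
    intro bq exp
    by_cases h : pvIsBq l = true
    · rw [pv_stepBq l h rest bq exp, ih]
      simp [h, Bool.or_assoc]
    · rw [pv_stepNon l (by simpa using h) rest bq true exp]
      simp [h, pvTail]

theorem pv_emit_eq (run : List String) :
    pvEmit run = pvMk (run.any pvIsStrong) (run.map pvContent) := by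
  simp [pvEmit, pvMk]

theorem pvTail_eq (xs : List String) (h : ∀ l ∈ xs.head?, pvIsBq l = false) :
    pvTail xs = pvLoopA xs [] false false := by
  cases xs with
  | nil => simp [pvTail, pvLoopA]
  | cons l r =>
    rw [pv_stepNon l (h l (by simp)) r [] false false]
    simp [pvTail]

theorem pv_main : ∀ (lines : List String), pvLoopA lines [] false false = pvLoopB lines := by
  intro lines
  induction lines using pvLoopB.induct with
  | case1 => simp [pvLoopA, pvLoopB]
  | case2 l rest h ih =>
    rw [pvLoopB, if_pos h, pv_stepFresh l h rest, pv_run, pv_emit_eq]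
    have hhead : ∀ l' ∈ (rest.dropWhile pvIsBq).head?, pvIsBq l' = false := by
      intro l' hl'
      cases hd : rest.dropWhile pvIsBq with
      | nil => simp [hd] at hl'
      | cons a b =>
        simp [hd] at hl'
        subst hl'
        have := List.head_dropWhile_not pvIsBq (l := rest) (by simp [hd])
        simpa [hd] using this
    rw [pvTail_eq _ hhead, ih]
    simp
  | case3 l rest h ih =>
    rw [pvLoopB, if_neg h, pv_stepNon l (by simpa using h) rest [] false false, ih]
    simp

-- ===== VERDICT (by name: the statement is the Claim_ definition above) =====
theorem combine_blockquotes_py_spec : Claim_equal_combine_blockquotes_py := by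
  intro text _
  unfold Spec_combine_blockquotes_py combine_blockquotes_py combine_blockquotes_py_alt
  rw [pv_main]
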